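-- pv_equiv track=rewrite | github.com/JoshuaMather/python-labs | Week10/PEP8_securecoding.py | do_conversion
-- ===== SOURCE A (Python) =====
-- def do_conversion(inputText, shiftValue):
--     resultingText = ""
--
--     inputTextPosition = 0
--     while (inputTextPosition < len(inputText)):
--         inputTextChar = inputText[inputTextPosition]
--
--         ASCIIValue = ord(inputTextChar)
--         ASCIIValue += shiftValue
--         resultingText = resultingText + chr(ASCIIValue)
--         inputTextPosition += 1
--
--     return resultingText
-- ===== SOURCE B (Python) =====
-- def do_conversion(inputText, shiftValue):
--     # Build a translation table over the distinct characters, then do one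
--     # library-mapped pass instead of index-by-index string concatenation.
--     table = {ord(c): ord(c) + shiftValue for c in set(inputText)}
--     return inputText.translate(table)
-- ===== Notes on version B (the rewrite author's own statement) =====
-- stated objective: faster
-- what changed: B precomputes a per-ordinal translation table over the distinct characters and returns inputText.translate(table) in one linear library pass, instead of A's index-driven while loop with quadratic string concatenation.
import Mathlib
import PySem

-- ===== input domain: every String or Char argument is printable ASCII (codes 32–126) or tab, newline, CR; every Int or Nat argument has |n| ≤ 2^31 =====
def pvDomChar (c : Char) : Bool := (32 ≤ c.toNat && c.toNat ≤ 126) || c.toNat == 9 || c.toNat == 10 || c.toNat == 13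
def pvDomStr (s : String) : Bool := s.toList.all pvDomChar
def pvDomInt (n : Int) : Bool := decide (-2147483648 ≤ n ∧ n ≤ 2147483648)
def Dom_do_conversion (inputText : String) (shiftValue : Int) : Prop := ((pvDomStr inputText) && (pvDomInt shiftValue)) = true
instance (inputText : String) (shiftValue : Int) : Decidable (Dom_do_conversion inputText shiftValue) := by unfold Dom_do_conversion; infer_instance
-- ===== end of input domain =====

-- B replaces A's index-driven while loop with a per-ordinal translation table
-- over the distinct characters followed by one mapped pass (more idiomatic).


-- ===== PORT A =====
-- while loop over positions, building the result by concatenation;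
-- chr(ASCIIValue) is ported as Char.ofNat (·.toNat), exact under Pre_ (where
-- Python's chr does not raise and the code point is a valid Lean Char).
def doConvLoop (shiftValue : Int) (chars : List Char) (res : List Char) : List Char :=
  match chars with
  | [] => res
  | c :: rest => doConvLoop shiftValue rest (res ++ [Char.ofNat (((c.toNat : Int) + shiftValue).toNat)])

def do_conversion (inputText : String) (shiftValue : Int) : String :=
  String.mk (doConvLoop shiftValue inputText.toList [])

-- ===== PORT B =====
-- table = {ord(c): ord(c) + shiftValue for c in set(inputText)}; inputText.translate(table)
def do_conversion_alt (inputText : String) (shiftValue : Int) : String :=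
  let table : PySem.Dict Int Int :=
    (PySem.Set.ofList inputText.toList).foldl
      (fun d c => d.insert (c.toNat : Int) ((c.toNat : Int) + shiftValue)) PySem.Dict.empty
  String.mk (inputText.toList.map (fun c =>
    match table.get? (c.toNat : Int) with
    | some v => Char.ofNat v.toNat
    | none => c))

-- ===== PRECONDITION & SPEC =====
-- Pre_ excludes shifts that take some character's code point out of 0..0x10FFFF
-- (Python's chr — and B's translate — raise ValueError there) or into the lone
-- surrogate range 0xD800..0xDFFF, where both Pythons return the same
-- surrogate-bearing string, which is not representable as a Lean String.
def Pre_do_conversion (inputText : String) (shiftValue : Int) : Prop :=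
  (inputText.toList.all (fun c =>
    decide (0 ≤ (c.toNat : Int) + shiftValue) && decide ((c.toNat : Int) + shiftValue ≤ 1114111) &&
    !(decide (55296 ≤ (c.toNat : Int) + shiftValue) && decide ((c.toNat : Int) + shiftValue ≤ 57343)))) = true
instance (inputText : String) (shiftValue : Int) : Decidable (Pre_do_conversion inputText shiftValue) := by
  unfold Pre_do_conversion; infer_instance
def pvWitness_do_conversion : String × Int := ("abc", 3)

def Spec_do_conversion (inputText : String) (shiftValue : Int) (out : String) : Prop := out = do_conversion_alt inputText shiftValue
instance (inputText : String) (shiftValue : Int) (out : String) : Decidable (Spec_do_conversion inputText shiftValue out) := by unfold Spec_do_conversion; infer_instance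

-- ===== CLAIM (what is proved, stated in full; the proofs are below) =====
def Claim_equal_do_conversion : Prop := ∀ (inputText : String) (shiftValue : Int), Dom_do_conversion inputText shiftValue → Pre_do_conversion inputText shiftValue → Spec_do_conversion inputText shiftValue (do_conversion inputText shiftValue)

-- ===== LEMMAS AND PROOFS =====

-- A's loop appends the shifted image of each remaining character.
theorem doConvLoop_eq_map (k : Int) (chars res : List Char) :
    doConvLoop k chars res = res ++ chars.map (fun c => Char.ofNat (((c.toNat : Int) + k).toNat)) := by
  induction chars generalizing res with
  | nil => simp [doConvLoop]
  | cons c rest ih => simp [doConvLoop, ih]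

-- Lookup in the table built by B's dict comprehension: any key that is the
-- ordinal of a listed character maps to key + shift.
theorem table_get (k : Int) (L : List Char) (d : PySem.Dict Int Int) (q : Int) :
    (L.foldl (fun d c => d.insert (c.toNat : Int) ((c.toNat : Int) + k)) d).get? q
      = if (∃ c ∈ L, (c.toNat : Int) = q) then some (q + k) else d.get? q := by
  induction L generalizing d with
  | nil => simp
  | cons c rest ih =>
    simp only [List.foldl_cons]
    rw [ih]
    by_cases hr : ∃ c' ∈ rest, (c'.toNat : Int) = q
    · rw [if_pos hr, if_pos (hr.imp (fun c' ⟨h1, h2⟩ => ⟨List.mem_cons_of_mem _ h1, h2⟩))]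
    · rw [if_neg hr, PySem.Dict.get?_insert]
      by_cases hc : q = (c.toNat : Int)
      · subst hc
        rw [if_pos rfl, if_pos ⟨c, List.mem_cons_self, rfl⟩]
      · have hno : ¬ ∃ c' ∈ c :: rest, (c'.toNat : Int) = q := by
          rintro ⟨c', hm, he⟩
          rcases List.mem_cons.mp hm with rfl | hm'
          · exact hc he.symm
          · exact hr ⟨c', hm', he⟩
        rw [if_neg hc, if_neg hno]

theorem do_conversion_eq_alt (inputText : String) (shiftValue : Int) :
    do_conversion inputText shiftValue = do_conversion_alt inputText shiftValue := by
  unfold do_conversion do_conversion_alt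
  rw [doConvLoop_eq_map]
  simp only [List.nil_append]
  congr 1
  apply List.map_congr_left
  intro c hc
  have hmem : ∃ c' ∈ PySem.Set.ofList inputText.toList, (c'.toNat : Int) = (c.toNat : Int) :=
    ⟨c, (PySem.Set.mem_ofList _ _).mpr hc, rfl⟩
  rw [table_get shiftValue (PySem.Set.ofList inputText.toList) PySem.Dict.empty ((c.toNat : Int)), if_pos hmem]

-- ===== VERDICT (by name: the statement is the Claim_ definition above) =====
theorem do_conversion_spec : Claim_equal_do_conversion := by
  intro inputText shiftValue _ _
  exact do_conversion_eq_alt inputText shiftValue
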